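-- pv_equiv track=rewrite | github.com/JaehyoJJAng/Algorithm | algorithm/programmers/lv0/69_조건에 맞게 수열 변환하기2.py | solution
-- ===== SOURCE A (Python) =====
-- from typing import List
--
-- def perform_operation(arr: List[int]) -> List[int]:
--     new_arr = arr[:]
--     for i in range(len(new_arr)):
--         if new_arr[i] >= 50 and new_arr[i] % 2 == 0:
--             new_arr[i] //= 2
--         elif new_arr[i] < 50 and new_arr[i] % 2 != 0:
--             new_arr[i] = new_arr[i] * 2 + 1
--     return new_arr
--
-- def solution(arr: List[int]) -> int:
--     x = 0
--     while True:
--         new_arr = perform_operation(arr)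
--         if new_arr == arr:
--             break
--         x += 1
--         arr = new_arr
--     return x
-- ===== SOURCE B (Python) =====
-- from typing import List
--
-- def solution(arr: List[int]) -> int:
--     # simulate each element independently to its fixed point; the global
--     # pass count is the max per-element step count
--     def steps(v: int) -> int:
--         c = 0
--         while True:
--             if v >= 50 and v % 2 == 0:
--                 nv = v // 2
--             elif v < 50 and v % 2 != 0:
--                 nv = v * 2 + 1
--             else:
--                 nv = v
--             if nv == v:
--                 return c
--             v = nv
--             c += 1
--     ans = 0
--     for v in arr:
--         ans = max(ans, steps(v))
--     return ans
-- ===== Notes on version B (the rewrite author's own statement) =====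
-- stated objective: alternative
-- what changed: Instead of repeatedly rebuilding the whole array until a global fixed point, B simulates each element independently to its own fixed point and returns the maximum per-element step count, so stabilized elements are never touched again.
import Mathlib
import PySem

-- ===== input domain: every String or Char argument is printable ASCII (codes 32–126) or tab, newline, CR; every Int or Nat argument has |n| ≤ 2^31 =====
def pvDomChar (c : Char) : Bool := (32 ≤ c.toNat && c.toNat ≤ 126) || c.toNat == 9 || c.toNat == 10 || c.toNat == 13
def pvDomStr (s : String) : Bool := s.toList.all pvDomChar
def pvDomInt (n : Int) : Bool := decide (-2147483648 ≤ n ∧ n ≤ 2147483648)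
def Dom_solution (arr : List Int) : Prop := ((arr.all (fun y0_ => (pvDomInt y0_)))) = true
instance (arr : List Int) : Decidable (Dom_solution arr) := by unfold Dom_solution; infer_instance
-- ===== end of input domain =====

-- B replaces A's repeated whole-array passes by an independent per-element simulation
-- whose maximum step count is returned (stabilized elements are never revisited).


-- ===== PORT A =====
def perform_operation (arr : List Int) : List Int :=
  arr.map (fun v =>
    if 50 ≤ v ∧ PySem.Int.mod v 2 = 0 then PySem.Int.floordiv v 2
    else if v < 50 ∧ PySem.Int.mod v 2 ≠ 0 then v * 2 + 1
    else v)

-- A's 'while True' loop; the fuel only makes it total, on Pre_ the loop exits before fuel runs out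
def solutionLoop (fuel : Nat) (arr : List Int) (x : Int) : Int :=
  match fuel with
  | 0 => x
  | n+1 =>
    let new_arr := perform_operation arr
    if new_arr = arr then x else solutionLoop n new_arr (x + 1)

def solution (arr : List Int) : Int := solutionLoop 2147483712 arr 0

-- ===== PORT B =====
-- per-element 'while True' loop of Source B; fuel only for totality, unused on Pre_
def stepsB (fuel : Nat) (v : Int) (c : Int) : Int :=
  match fuel with
  | 0 => c
  | n+1 =>
    let nv := if 50 ≤ v ∧ PySem.Int.mod v 2 = 0 then PySem.Int.floordiv v 2
              else if v < 50 ∧ PySem.Int.mod v 2 ≠ 0 then v * 2 + 1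
              else v
    if nv = v then c else stepsB n nv (c + 1)

def solution_alt (arr : List Int) : Int :=
  arr.foldl (fun ans v => max ans (stepsB 2147483712 v 0)) 0

-- ===== PRECONDITION & SPEC =====
-- Pre_ excludes arrays containing a negative odd element other than -1: on those A's
-- while loop never reaches a fixed point (the element keeps decreasing), so A diverges.
def Pre_solution (arr : List Int) : Prop := ∀ v ∈ arr, 0 ≤ v ∨ v % 2 = 0 ∨ v = -1
instance (arr : List Int) : Decidable (Pre_solution arr) := by unfold Pre_solution; infer_instance
def pvWitness_solution : List Int := [1, 100, 3, -1, -4, 2147483648]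

def Spec_solution (arr : List Int) (out : Int) : Prop := out = solution_alt arr
instance (arr : List Int) (out : Int) : Decidable (Spec_solution arr out) := by unfold Spec_solution; infer_instance

-- ===== CLAIM (what is proved, stated in full; the proofs are below) =====
def Claim_equal_solution : Prop := ∀ (arr : List Int), Dom_solution arr → Pre_solution arr → Spec_solution arr (solution arr)

-- ===== LEMMAS AND PROOFS =====

-- the per-element step function both programs iterate
def fstep (v : Int) : Int :=
  if 50 ≤ v ∧ PySem.Int.mod v 2 = 0 then PySem.Int.floordiv v 2
  else if v < 50 ∧ PySem.Int.mod v 2 ≠ 0 then v * 2 + 1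
  else v

theorem perform_eq_map (arr : List Int) : perform_operation arr = arr.map fstep := rfl

theorem solutionLoop_succ (n : Nat) (arr : List Int) (x : Int) :
    solutionLoop (n+1) arr x =
      if perform_operation arr = arr then x else solutionLoop n (perform_operation arr) (x+1) := rfl

theorem stepsB_succ (n : Nat) (v c : Int) :
    stepsB (n+1) v c = if fstep v = v then c else stepsB n (fstep v) (c+1) := rfl

-- step count of one element, counting-down form of stepsB
def gcnt : Nat → Int → Int
  | 0, _ => 0
  | n+1, v => if fstep v = v then 0 else gcnt n (fstep v) + 1

theorem gcnt_nonneg (n : Nat) (v : Int) : 0 ≤ gcnt n v := by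
  induction n generalizing v with
  | zero => simp [gcnt]
  | succ n ih =>
    simp only [gcnt]
    split
    · simp
    · have := ih (fstep v); omega

theorem gcnt_fixed (n : Nat) (v : Int) (h : fstep v = v) : gcnt n v = 0 := by
  cases n <;> simp [gcnt, h]

theorem stepsB_eq_gcnt (n : Nat) (v c : Int) : stepsB n v c = c + gcnt n v := by
  induction n generalizing v c with
  | zero => simp [stepsB, gcnt]
  | succ n ih =>
    rw [stepsB_succ]
    by_cases h : fstep v = v
    · simp [h, gcnt]
    · simp only [gcnt, if_neg h, ih]
      omega

-- max of per-element counts, head-recursive form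
def mrk (n : Nat) (arr : List Int) : Int :=
  arr.foldr (fun v a => max (gcnt n v) a) 0

theorem mrk_cons (n : Nat) (x : Int) (t : List Int) :
    mrk n (x :: t) = max (gcnt n x) (mrk n t) := rfl

theorem mrk_nonneg (n : Nat) (arr : List Int) : 0 ≤ mrk n arr := by
  induction arr with
  | nil => simp [mrk]
  | cons x t ih => rw [mrk_cons]; exact le_trans ih (le_max_right _ _)

theorem mrk_zero_of_fixed (n : Nat) (arr : List Int) (h : ∀ v ∈ arr, fstep v = v) :
    mrk n arr = 0 := by
  induction arr with
  | nil => rfl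
  | cons x t ih =>
    rw [mrk_cons, gcnt_fixed n x (h x (by simp)), ih (fun v hv => h v (by simp [hv]))]
    simp

theorem gcnt_le_mrk (n : Nat) (arr : List Int) (v : Int) (hv : v ∈ arr) :
    gcnt n v ≤ mrk n arr := by
  induction arr with
  | nil => cases hv
  | cons x t ih =>
    rw [mrk_cons]
    rcases List.mem_cons.mp hv with h | h
    · subst h; exact le_max_left _ _
    · exact le_trans (ih h) (le_max_right _ _)

theorem gcnt_succ_max_one (n : Nat) (v : Int) :
    max (gcnt (n+1) v) 1 = max (gcnt n (fstep v) + 1) 1 := by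
  by_cases h : fstep v = v
  · rw [gcnt_fixed (n+1) v h, h, gcnt_fixed n v h]
    decide
  · simp only [gcnt, if_neg h]

theorem mrk_succ_shift (n : Nat) (arr : List Int) :
    max (mrk (n+1) arr) 1 = mrk n (arr.map fstep) + 1 := by
  induction arr with
  | nil => simp [mrk]
  | cons x t ih =>
    have h1 := gcnt_succ_max_one n x
    rw [List.map_cons, mrk_cons, mrk_cons]
    have h3 := mrk_nonneg n (arr := t.map fstep)
    have h4 := mrk_nonneg (n+1) t
    have h5 := gcnt_nonneg (n+1) x
    have h6 := gcnt_nonneg n (fstep x)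
    simp only [Int.max_def] at h1 ih ⊢
    split_ifs at h1 ih ⊢ <;> omega

theorem one_le_mrk (n : Nat) (arr : List Int) (v : Int) (hv : v ∈ arr)
    (h : fstep v ≠ v) : 1 ≤ mrk (n+1) arr := by
  have h1 : 1 ≤ gcnt (n+1) v := by
    have := gcnt_nonneg n (fstep v)
    simp only [gcnt, if_neg h]; omega
  exact le_trans h1 (gcnt_le_mrk (n+1) arr v hv)

theorem map_fstep_eq_self (arr : List Int) :
    arr.map fstep = arr ↔ ∀ v ∈ arr, fstep v = v := by
  induction arr with
  | nil => simp
  | cons x t ih =>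
    simp only [List.map_cons, List.cons.injEq, List.mem_cons]
    constructor
    · rintro ⟨h1, h2⟩ v hv
      rcases hv with rfl | hv
      · exact h1
      · exact (ih.mp h2) v hv
    · intro h
      exact ⟨h x (Or.inl rfl), ih.mpr (fun v hv => h v (Or.inr hv))⟩

-- the global loop computes the max of the per-element step counts
theorem loop_eq_mrk (n : Nat) (arr : List Int) (acc : Int)
    (h : ∀ v ∈ arr, fstep^[n] v = fstep^[n+1] v) :
    solutionLoop (n+1) arr acc = acc + mrk (n+1) arr := by
  induction n generalizing arr acc with
  | zero =>
    have hfix : ∀ v ∈ arr, fstep v = v := by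
      intro v hv
      have := h v hv
      simpa using this.symm
    rw [solutionLoop_succ, perform_eq_map, if_pos ((map_fstep_eq_self arr).mpr hfix),
        mrk_zero_of_fixed _ _ hfix]
    omega
  | succ n ih =>
    rw [solutionLoop_succ, perform_eq_map]
    by_cases hall : arr.map fstep = arr
    · rw [if_pos hall, mrk_zero_of_fixed _ _ ((map_fstep_eq_self arr).mp hall)]
      omega
    · rw [if_neg hall]
      have hnext : ∀ v ∈ arr.map fstep, fstep^[n] v = fstep^[n+1] v := by
        intro v hv
        rcases List.mem_map.mp hv with ⟨w, hw, rfl⟩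
        have := h w hw
        rwa [Function.iterate_succ_apply, Function.iterate_succ_apply] at this
      rw [ih (arr.map fstep) (acc+1) hnext]
      obtain ⟨v, hv, hne⟩ : ∃ v ∈ arr, fstep v ≠ v := by
        by_contra hc
        push Not at hc
        exact hall ((map_fstep_eq_self arr).mpr hc)
      have h1 := one_le_mrk (n+1) arr v hv hne
      have h2 := mrk_succ_shift (n+1) arr
      simp only [Int.max_def] at h2
      split_ifs at h2 <;> omega

-- ===== stabilization: every admitted element reaches its fixed point quickly =====

def Sinv (v : Int) : Prop := v ≤ 2147483648 ∧ (0 ≤ v ∨ v % 2 = 0 ∨ v = -1)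

def mu (v : Int) : Nat :=
  if 50 ≤ v ∧ v % 2 = 0 then v.toNat
  else if 0 ≤ v ∧ v < 50 ∧ v % 2 ≠ 0 then (51 - v).toNat
  else 0

theorem fstep_char (v : Int) :
    fstep v = if 50 ≤ v ∧ v % 2 = 0 then v / 2
              else if v < 50 ∧ v % 2 ≠ 0 then v * 2 + 1 else v := by
  unfold fstep
  rw [PySem.Int.mod_eq_emod_of_pos (by norm_num : (0:Int) < 2),
      PySem.Int.floordiv_eq_ediv_of_pos (by norm_num : (0:Int) < 2)]

theorem Sinv_step (v : Int) (h : Sinv v) : Sinv (fstep v) := by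
  rcases h with ⟨hb, hp⟩
  rw [fstep_char]
  constructor
  · split_ifs <;> omega
  · split_ifs with h1 h2
    · left; omega
    · rcases hp with h | h | h <;> omega
    · exact hp

theorem mu_decr (v : Int) (h : Sinv v) (hne : fstep v ≠ v) : mu (fstep v) < mu v := by
  rcases h with ⟨hb, hp⟩
  rw [fstep_char] at hne ⊢
  by_cases h1 : 50 ≤ v ∧ v % 2 = 0
  · rw [if_pos h1] at hne ⊢
    unfold mu
    split_ifs <;> omega
  · rw [if_neg h1] at hne ⊢
    by_cases h2 : v < 50 ∧ v % 2 ≠ 0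
    · rw [if_pos h2] at hne ⊢
      have hx : 0 ≤ v := by rcases hp with h | h | h <;> omega
      unfold mu
      split_ifs <;> omega
    · rw [if_neg h2] at hne
      exact absurd rfl hne

theorem fixed_stays (v : Int) (h : fstep v = v) (n : Nat) : fstep^[n] v = v :=
  Function.iterate_fixed h n

theorem stab (n : Nat) (v : Int) (hS : Sinv v) (hmu : mu v ≤ n) :
    fstep^[n] v = fstep^[n+1] v := by
  induction n generalizing v with
  | zero =>
    have h0 : mu v = 0 := by omega
    have hfix : fstep v = v := by
      by_contra hne
      have := mu_decr v hS hne
      omega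
    simp [hfix]
  | succ n ih =>
    by_cases hfix : fstep v = v
    · rw [fixed_stays v hfix, fixed_stays v hfix]
    · have hd := mu_decr v hS hfix
      have := ih (fstep v) (Sinv_step v hS) (by omega)
      rw [Function.iterate_succ_apply, Function.iterate_succ_apply]
      exact this

theorem mu_le (v : Int) (hb : v ≤ 2147483648) : mu v ≤ 2147483711 := by
  unfold mu
  split_ifs <;> omega

-- bridge B's foldl to mrk
theorem foldl_max_eq (l : List Int) (c : Int) (hc : 0 ≤ c) :
    l.foldl (fun ans v => max ans (stepsB 2147483712 v 0)) c = max c (mrk 2147483712 l) := by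
  induction l generalizing c with
  | nil => simpa [mrk] using (max_eq_left hc).symm
  | cons x t ih =>
    rw [List.foldl_cons, ih _ (le_trans hc (le_max_left _ _)), mrk_cons,
        stepsB_eq_gcnt, zero_add, max_assoc]

theorem solution_alt_eq_mrk (arr : List Int) : solution_alt arr = mrk 2147483712 arr := by
  unfold solution_alt
  rw [foldl_max_eq arr 0 le_rfl]
  exact max_eq_right (mrk_nonneg _ _)

-- ===== VERDICT (by name: the statement is the Claim_ definition above) =====
theorem solution_spec : Claim_equal_solution := by
  intro arr hdom hpre
  unfold Spec_solution
  have hstab : ∀ v ∈ arr, fstep^[2147483711] v = fstep^[2147483711+1] v := by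
    intro v hv
    have hb : pvDomInt v = true := by
      have := (List.all_eq_true.mp hdom) v hv
      simpa using this
    have hb' : -2147483648 ≤ v ∧ v ≤ 2147483648 := by
      simpa [pvDomInt] using hb
    have hS : Sinv v := ⟨hb'.2, hpre v hv⟩
    exact stab 2147483711 v hS (mu_le v hb'.2)
  have hF : solution arr = solutionLoop (2147483711+1) arr 0 := rfl
  rw [hF, loop_eq_mrk 2147483711 arr 0 hstab, solution_alt_eq_mrk]
  norm_num
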